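-- pv_equiv track=rewrite | github.com/norbertbago/problem-solving | boost-up-problem-solving/off_line_minimum.py | OffLineMinimum
-- ===== SOURCE A (Python) =====
-- def OffLineMinimum(strArr):
--     currentNumbers = list()
--     result = list()
--     for idx,ch in enumerate(strArr):
--         if ch.isnumeric():
--             currentNumbers.append(int(ch))
--         elif ch == "E":
--             currentNumbers = sorted(currentNumbers)
--             result.append(currentNumbers[0])
--             currentNumbers.pop(0)
--
--     return result
-- ===== SOURCE B (Python) =====
-- def OffLineMinimum(strArr):
--     # Keep the pool of numbers in non-decreasing order at all times:
--     # insert each new number in place, so an 'E' just takes the front.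
--     pool = []
--     result = []
--     for ch in strArr:
--         if ch.isnumeric():
--             n = int(ch)
--             i = 0
--             while i < len(pool) and pool[i] <= n:
--                 i += 1
--             pool.insert(i, n)
--         elif ch == "E":
--             result.append(pool[0])
--             pool = pool[1:]
--     return result
-- ===== Notes on version B (the rewrite author's own statement) =====
-- stated objective: alternative
-- what changed: Instead of re-sorting the whole pool on every 'E' query, B keeps the pool sorted at all times by inserting each pushed number at its place, so each 'E' just takes the front element.
import Mathlib
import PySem

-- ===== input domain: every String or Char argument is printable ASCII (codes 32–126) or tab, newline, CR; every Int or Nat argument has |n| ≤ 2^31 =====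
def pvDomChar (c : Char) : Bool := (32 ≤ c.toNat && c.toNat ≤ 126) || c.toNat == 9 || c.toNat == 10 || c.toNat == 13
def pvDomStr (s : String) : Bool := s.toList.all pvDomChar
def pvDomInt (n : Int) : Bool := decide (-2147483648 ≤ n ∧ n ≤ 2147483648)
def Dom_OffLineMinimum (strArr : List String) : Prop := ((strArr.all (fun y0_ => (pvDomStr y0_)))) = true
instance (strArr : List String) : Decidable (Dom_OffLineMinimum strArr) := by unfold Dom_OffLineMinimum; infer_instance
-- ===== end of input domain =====

-- B re-sorts nothing: it keeps the pool sorted by in-place insertion, so each 'E' takes the front;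
-- A re-sorts the whole pool on every 'E'.

-- ===== PORT A =====
-- ch.isnumeric() on the ASCII domain is exactly 'nonempty, all digits' = Str.strIsdigit;
-- currentNumbers[0] is ported with pyGetD (default 0): the IndexError on 'E' with an empty
-- pool is excluded by Pre_; pop(0) on a nonempty list leaves the tail.
def pvStepA (st : List Int × List Int) (ch : String) : List Int × List Int :=
  if PySem.Str.strIsdigit ch then
    (st.1 ++ [(PySem.Int.ofStr? ch).getD 0], st.2)
  else if ch == "E" then
    let cur := PySem.List.sorted st.1 (fun x => x) false
    (cur.tail, st.2 ++ [PySem.List.pyGetD cur 0 0])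
  else st

def OffLineMinimum (strArr : List String) : List Int :=
  (strArr.foldl pvStepA ([], [])).2

-- ===== PORT B =====
-- linear insertion 'i = 0; while i < len(pool) and pool[i] <= n: i += 1; pool.insert(i, n)'
def pvInsLin (pool : List Int) (n : Int) : List Int :=
  match pool with
  | [] => [n]
  | x :: xs => if x ≤ n then x :: pvInsLin xs n else n :: x :: xs

-- pool[0] ported with pyGetD (default 0), same IndexError excluded by Pre_; pool[1:] = drop 1
def pvStepB (st : List Int × List Int) (ch : String) : List Int × List Int :=
  if PySem.Str.strIsdigit ch then
    (pvInsLin st.1 ((PySem.Int.ofStr? ch).getD 0), st.2)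
  else if ch == "E" then
    (st.1.drop 1, st.2 ++ [PySem.List.pyGetD st.1 0 0])
  else st

def OffLineMinimum_alt (strArr : List String) : List Int :=
  (strArr.foldl pvStepB ([], [])).2

-- ===== PRECONDITION & SPEC =====
-- Pre_ excludes exactly the inputs where Python A (and B) raise IndexError: some prefix
-- contains more "E" queries than numbers pushed so far.
def Pre_OffLineMinimum (strArr : List String) : Prop :=
  ∀ i < strArr.length + 1,
    (strArr.take i).countP (fun s => s == "E") ≤
      (strArr.take i).countP (fun s => !s.isEmpty && s.toList.all Char.isDigit)
instance (strArr : List String) : Decidable (Pre_OffLineMinimum strArr) := by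
  unfold Pre_OffLineMinimum; infer_instance

def pvWitness_OffLineMinimum : List String := ["4", "1", "E", "E", "7", "E"]

def Spec_OffLineMinimum (strArr : List String) (out : List Int) : Prop := out = OffLineMinimum_alt strArr
instance (strArr : List String) (out : List Int) : Decidable (Spec_OffLineMinimum strArr out) := by unfold Spec_OffLineMinimum; infer_instance

-- ===== CLAIM (what is proved, stated in full; the proofs are below) =====
def Claim_equal_OffLineMinimum : Prop := ∀ (strArr : List String), Dom_OffLineMinimum strArr → Pre_OffLineMinimum strArr → Spec_OffLineMinimum strArr (OffLineMinimum strArr)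

-- ===== LEMMAS AND PROOFS =====

lemma pvInsLin_perm (pool : List Int) (n : Int) : (pvInsLin pool n).Perm (n :: pool) := by
  induction pool with
  | nil => simp [pvInsLin]
  | cons x xs ih =>
    simp only [pvInsLin]
    split_ifs with h
    · exact ((ih.cons x).trans (List.Perm.swap n x xs))
    · exact List.Perm.refl _

lemma pvInsLin_mem {pool : List Int} {n y : Int} (hy : y ∈ pvInsLin pool n) :
    y = n ∨ y ∈ pool := by
  have := (pvInsLin_perm pool n).mem_iff.mp hy
  simpa using this

lemma pvInsLin_pairwise {pool : List Int} (n : Int) (h : pool.Pairwise (· ≤ ·)) :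
    (pvInsLin pool n).Pairwise (· ≤ ·) := by
  induction pool with
  | nil => simp [pvInsLin]
  | cons x xs ih =>
    rw [List.pairwise_cons] at h
    obtain ⟨hx, hxs⟩ := h
    simp only [pvInsLin]
    split_ifs with hle
    · refine List.pairwise_cons.mpr ⟨?_, ih hxs⟩
      intro y hy
      rcases pvInsLin_mem hy with rfl | hy'
      · exact hle
      · exact hx y hy'
    · refine List.pairwise_cons.mpr ⟨?_, List.pairwise_cons.mpr ⟨hx, hxs⟩⟩
      intro y hy
      have hn : n ≤ x := le_of_not_ge hle
      rcases List.mem_cons.mp hy with rfl | hy'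
      · exact hn
      · exact hn.trans (hx y hy')

lemma pvFold_eq (l : List String) (cur pool res : List Int)
    (hs : pool.Pairwise (· ≤ ·)) (hp : pool.Perm cur) :
    (l.foldl pvStepB (pool, res)).2 = (l.foldl pvStepA (cur, res)).2 := by
  induction l generalizing cur pool res with
  | nil => exact rfl
  | cons ch t ih =>
    simp only [List.foldl_cons]
    by_cases hd : PySem.Str.strIsdigit ch
    · simp only [pvStepA, pvStepB, hd, if_pos]
      exact ih (cur ++ [(PySem.Int.ofStr? ch).getD 0]) _ res
        (pvInsLin_pairwise _ hs)
        (((pvInsLin_perm pool _).trans (hp.cons _)).trans (List.perm_append_singleton _ _).symm)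
    · by_cases he : ch == "E"
      · have hsort : PySem.List.sorted cur (fun x => x) false = pool :=
          PySem.List.sorted_id_eq_of_perm_of_pairwise cur pool hp hs
        simp only [pvStepA, pvStepB, hd, he, if_pos, hsort, List.drop_one]
        exact ih pool.tail pool.tail _ (hs.sublist (List.tail_sublist _)) (List.Perm.refl _)
      · simp only [pvStepA, pvStepB, hd, he]
        exact ih cur pool res hs hp

-- ===== VERDICT (by name: the statement is the Claim_ definition above) =====
theorem OffLineMinimum_spec : Claim_equal_OffLineMinimum := by
  intro strArr _ _
  unfold Spec_OffLineMinimum OffLineMinimum OffLineMinimum_alt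
  exact (pvFold_eq strArr [] [] [] (by simp) (List.Perm.refl _)).symm
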